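-- pv_equiv track=rewrite | github.com/MrBrantCode/unitest_baseline | mut_generate/mist_train_cf/cf_57823/solution.py | advanced_case_inversion_and_alteration
-- ===== SOURCE A (Python) =====
-- def advanced_case_inversion_and_alteration(string: str) -> str:
--     def get_next_prime(n):
--         def is_prime(num):
--             if num <= 1:
--                 return False
--             elif num <= 3:
--                 return True
--             elif num % 2 == 0 or num % 3 == 0:
--                 return False
--             i = 5
--             while i * i <= num:
--                 if num % i == 0 or num % (i + 2) == 0:
--                     return False
--                 i = i + 6
--             return True
--
--         prime = n
--         found = False
--
--         while not found:
--             prime += 2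
--             if is_prime(prime):
--                 found = True
--
--         return prime
--
--     result = ""
--     for char in string:
--         if char.isalpha():
--             if char.isupper():
--                 result += char.lower()
--             else:
--                 result += char.upper()
--         elif char.isdigit():
--             num = int(char)
--             if num % 2 != 0:
--                 result += str(get_next_prime(num))
--             else:
--                 result += char
--         else:
--             result += char * 3
--     return result
-- ===== SOURCE B (Python) =====
-- ODD = {'1': '3', '3': '5', '5': '7', '7': '11', '9': '11'}  # precomputed get_next_prime results for odd digits
--
-- def _image(c):
--     if c.isalpha():
--         return c.swapcase()
--     if c in ODD:
--         return ODD[c]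
--     if c.isdigit():
--         return c
--     return c * 3
--
-- def advanced_case_inversion_and_alteration(string: str) -> str:
--     table = {ord(c): _image(c) for c in set(string)}
--     return string.translate(table)
-- ===== Notes on version B (the rewrite author's own statement) =====
-- stated objective: idiomatic
-- what changed: Replaces the per-character if/elif chain (with an on-the-fly next-prime search per odd digit) by a translation table built once over the distinct characters of the input, with the odd-digit results precomputed in a fixed dict, applied in one str.translate pass.
import Mathlib
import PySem

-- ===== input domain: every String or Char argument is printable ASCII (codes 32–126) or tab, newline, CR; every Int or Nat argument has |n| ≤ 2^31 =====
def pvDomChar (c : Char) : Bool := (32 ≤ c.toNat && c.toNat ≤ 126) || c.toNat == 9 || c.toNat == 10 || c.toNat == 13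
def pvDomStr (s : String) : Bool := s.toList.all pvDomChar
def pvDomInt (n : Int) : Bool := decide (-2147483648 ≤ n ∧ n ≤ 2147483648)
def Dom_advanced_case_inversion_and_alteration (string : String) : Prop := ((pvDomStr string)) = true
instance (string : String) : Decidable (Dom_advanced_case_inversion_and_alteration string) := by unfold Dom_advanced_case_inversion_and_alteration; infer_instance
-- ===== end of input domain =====

-- B replaces A's per-character if/elif chain by a translation table built once over the distinct
-- characters and a single translate pass (objective: idiomatic; a timing run measured B faster by a constant factor).

-- ===== PORT A =====
-- char.isalpha() / isupper() / isdigit(): exact on the ASCII domain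
def pvAIsAlpha (c : Char) : Bool := ('a' ≤ c && c ≤ 'z') || ('A' ≤ c && c ≤ 'Z')
def pvAIsUpper (c : Char) : Bool := 'A' ≤ c && c ≤ 'Z'
def pvAIsDigit (c : Char) : Bool := '0' ≤ c && c ≤ '9'

-- inner while of is_prime; fuel only makes the loop total (i grows by 6, bounded by num)
def pvIsPrimeLoop : Nat → Int → Int → Bool
  | 0, _, _ => true
  | fuel + 1, num, i =>
      if i * i ≤ num then
        if PySem.Int.mod num i == 0 || PySem.Int.mod num (i + 2) == 0 then false
        else pvIsPrimeLoop fuel num (i + 6)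
      else true

def pvIsPrime (num : Int) : Bool :=
  if num ≤ 1 then false
  else if num ≤ 3 then true
  else if PySem.Int.mod num 2 == 0 || PySem.Int.mod num 3 == 0 then false
  else pvIsPrimeLoop num.toNat num 5

-- while-not-found loop of get_next_prime; fuel is a totality guard only (a prime is found long before)
def pvNextPrimeLoop : Nat → Int → Int
  | 0, prime => prime
  | fuel + 1, prime =>
      let prime' := prime + 2
      if pvIsPrime prime' then prime' else pvNextPrimeLoop fuel prime'

def pvGetNextPrime (n : Int) : Int := pvNextPrimeLoop (n.toNat + 100) n

def advanced_case_inversion_and_alteration (string : String) : String :=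
  String.mk
    (string.toList.foldl
      (fun result char =>
        if pvAIsAlpha char then
          if pvAIsUpper char then result ++ [char.toLower]
          else result ++ [char.toUpper]
        else if pvAIsDigit char then
          -- num = int(char): exact for a single ASCII digit character
          let num : Int := (char.toNat : Int) - 48
          if PySem.Int.mod num 2 != 0 then result ++ PySem.Int.toChars (pvGetNextPrime num)
          else result ++ [char]
        else result ++ [char, char, char])
      [])

-- ===== PORT B =====
def pvBOdd : PySem.Dict Char (List Char) :=
  PySem.Dict.ofList [('1', ['3']), ('3', ['5']), ('5', ['7']), ('7', ['1', '1']), ('9', ['1', '1'])]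

-- c.isalpha() / c.swapcase() / c.isdigit(): exact on the ASCII domain
def pvBImage (c : Char) : List Char :=
  if ('a' ≤ c && c ≤ 'z') || ('A' ≤ c && c ≤ 'Z') then
    [if c.isUpper then c.toLower else c.toUpper]
  else
    match pvBOdd.get? c with
    | some v => v
    | none => if '0' ≤ c && c ≤ '9' then [c] else [c, c, c]

def advanced_case_inversion_and_alteration_alt (string : String) : String :=
  let table : PySem.Dict Char (List Char) :=
    (PySem.Set.ofList string.toList).foldl (fun d c => d.insert c (pvBImage c)) PySem.Dict.empty
  -- str.translate: a character missing from the table is kept unchanged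
  String.mk ((string.toList.map (fun c => table.getD c [c])).flatten)

-- ===== PRECONDITION & SPEC =====
def Spec_advanced_case_inversion_and_alteration (string : String) (out : String) : Prop := out = advanced_case_inversion_and_alteration_alt string
instance (string : String) (out : String) : Decidable (Spec_advanced_case_inversion_and_alteration string out) := by unfold Spec_advanced_case_inversion_and_alteration; infer_instance

-- ===== CLAIM (what is proved, stated in full; the proofs are below) =====
def Claim_equal_advanced_case_inversion_and_alteration : Prop := ∀ (string : String), Dom_advanced_case_inversion_and_alteration string → Spec_advanced_case_inversion_and_alteration string (advanced_case_inversion_and_alteration string)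

-- ===== LEMMAS AND PROOFS =====

-- A's per-character contribution, factored out of its foldl body
def pvAStep (char : Char) : List Char :=
  if pvAIsAlpha char then
    if pvAIsUpper char then [char.toLower] else [char.toUpper]
  else if pvAIsDigit char then
    let num : Int := (char.toNat : Int) - 48
    if PySem.Int.mod num 2 != 0 then PySem.Int.toChars (pvGetNextPrime num)
    else [char]
  else [char, char, char]

lemma pvA_fold_eq (l : List Char) (acc : List Char) :
    l.foldl
      (fun result char =>
        if pvAIsAlpha char then
          if pvAIsUpper char then result ++ [char.toLower]
          else result ++ [char.toUpper]
        else if pvAIsDigit char then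
          let num : Int := (char.toNat : Int) - 48
          if PySem.Int.mod num 2 != 0 then result ++ PySem.Int.toChars (pvGetNextPrime num)
          else result ++ [char]
        else result ++ [char, char, char])
      acc
    = acc ++ l.flatMap pvAStep := by
  induction l generalizing acc with
  | nil => simp
  | cons c t ih =>
    simp only [List.foldl_cons, List.flatMap_cons, ih, pvAStep]
    split_ifs <;> simp

-- per-character agreement on ASCII codes
lemma pvStep_eq_image : ∀ n : Fin 128, pvAStep (Char.ofNat n.val) = pvBImage (Char.ofNat n.val) := by
  decide

lemma pvStep_eq_image' (c : Char) (h : pvDomChar c = true) : pvAStep c = pvBImage c := by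
  have hlt : c.toNat < 128 := by
    simp [pvDomChar] at h
    omega
  have hc : Char.ofNat c.toNat = c := by
    simp [Char.ofNat_toNat]
  have := pvStep_eq_image ⟨c.toNat, hlt⟩
  rwa [hc] at this

-- lookup in a table built by inserting (c, g c) over a list
lemma pvTable_getD_not_mem (g : Char → List Char) (c : Char) (l : List Char) (hc : c ∉ l)
    (d : PySem.Dict Char (List Char)) (dflt : List Char) :
    (l.foldl (fun d x => d.insert x (g x)) d).getD c dflt = d.getD c dflt := by
  induction l generalizing d with
  | nil => rfl
  | cons x t ih =>
    simp only [List.foldl_cons]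
    rw [ih (fun h => hc (List.mem_cons_of_mem _ h))]
    rw [PySem.Dict.getD_insert, if_neg]
    intro h
    subst h
    exact hc List.mem_cons_self

lemma pvTable_getD (g : Char → List Char) (c : Char) (l : List Char) (hc : c ∈ l) (hnd : l.Nodup)
    (d : PySem.Dict Char (List Char)) (dflt : List Char) :
    (l.foldl (fun d x => d.insert x (g x)) d).getD c dflt = g c := by
  induction l generalizing d with
  | nil => cases hc
  | cons x t ih =>
    simp only [List.foldl_cons]
    rcases List.mem_cons.mp hc with h | h
    · subst h
      rw [pvTable_getD_not_mem g c t (List.nodup_cons.mp hnd).1]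
      exact PySem.Dict.getD_insert_self _ _ _ _
    · exact ih h (List.nodup_cons.mp hnd).2 _

-- ===== VERDICT (by name: the statement is the Claim_ definition above) =====
theorem advanced_case_inversion_and_alteration_spec : Claim_equal_advanced_case_inversion_and_alteration := by
  intro s hdom
  unfold Spec_advanced_case_inversion_and_alteration
  unfold advanced_case_inversion_and_alteration advanced_case_inversion_and_alteration_alt
  rw [pvA_fold_eq]
  simp only [List.nil_append]
  congr 1
  rw [List.flatMap_def]
  congr 1
  apply List.map_congr_left
  intro c hc
  rw [pvTable_getD pvBImage c _ (by simpa [PySem.Set.mem_ofList] using hc) (PySem.Set.nodup_ofList _)]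
  exact pvStep_eq_image' c (by
    simp only [Dom_advanced_case_inversion_and_alteration, pvDomStr, List.all_eq_true] at hdom
    exact hdom c hc)
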